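-- pv_equiv track=rewrite | github.com/PJ71194/DSA | BTrees/MaxDepthFromPreorder.py | getDepthRecursive
-- ===== SOURCE A (Python) =====
-- def getDepthRecursive(preorder, index):
-- 	n = len(preorder)
-- 	idx = index[0]
-- 	if idx >= n or preorder[idx] == 'l':
-- 		return 0
--
-- 	index[0] += 1
-- 	leftHt = getDepthRecursive(preorder, index)
-- 	index[0] += 1
-- 	rightHt = getDepthRecursive(preorder, index)
--
-- 	return max(leftHt, rightHt) + 1
-- ===== SOURCE B (Python) =====
-- def getDepthRecursive(preorder, index):
--     n = len(preorder)
--     idx = index[0]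
--     ans = 0
--     d = 0
--     stack = []  # depths of pending right subtrees
--     while True:
--         if idx >= n or preorder[idx] == 'l':
--             if d > ans:
--                 ans = d
--             if not stack:
--                 break
--             d = stack.pop()
--             idx += 1
--         else:
--             stack.append(d + 1)
--             d += 1
--             idx += 1
--     index[0] = idx
--     return ans
-- ===== Notes on version B (the rewrite author's own statement) =====
-- stated objective: alternative
-- what changed: Replaced the two-call recursion on a mutable index by a single left-to-right scan with an explicit stack of pending right-child depths, exploiting that the traversal consumes positions sequentially; same return value and same final index[0] mutation.
import Mathlib
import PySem

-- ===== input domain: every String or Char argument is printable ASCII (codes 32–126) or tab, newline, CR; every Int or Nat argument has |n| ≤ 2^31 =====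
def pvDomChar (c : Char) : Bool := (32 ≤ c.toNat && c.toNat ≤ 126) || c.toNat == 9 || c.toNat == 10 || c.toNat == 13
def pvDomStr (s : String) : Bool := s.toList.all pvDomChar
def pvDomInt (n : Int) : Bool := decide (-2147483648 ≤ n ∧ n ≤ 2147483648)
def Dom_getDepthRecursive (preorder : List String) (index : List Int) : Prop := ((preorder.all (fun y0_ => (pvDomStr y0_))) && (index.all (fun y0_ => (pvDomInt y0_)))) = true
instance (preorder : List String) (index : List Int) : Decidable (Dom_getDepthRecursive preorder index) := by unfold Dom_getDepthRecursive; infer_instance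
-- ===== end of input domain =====

-- B replaces the two-call recursion by one left-to-right scan with an explicit stack of
-- pending right-child depths (objective: alternative decomposition, same cost).
-- A mutates index[0] in place; B performs the SAME mutation, but the equivalence proved
-- here is about the RETURN value only.

-- ===== PORT A =====
-- recursion on (idx); fuel is only a termination guard and is supplied sufficiently by
-- the wrapper (each nesting level strictly increases idx, so depth ≤ (n - idx) + 1).
-- When pyGet? = none the Python raises IndexError (excluded by Pre_); the port returns (0, idx).
def goA (pre : List String) (fuel : Nat) (idx : Int) : Int × Int :=
  match fuel with
  | 0 => (0, idx)
  | fuel + 1 =>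
    if (pre.length : Int) ≤ idx then (0, idx)
    else
      match PySem.List.pyGet? pre idx with
      | none => (0, idx)
      | some s =>
        if s = "l" then (0, idx)
        else
          let l := goA pre fuel (idx + 1)
          let r := goA pre fuel (l.2 + 1)
          (max l.1 r.1 + 1, r.2)

def getDepthRecursive (preorder : List String) (index : List Int) : Int :=
  match PySem.List.pyGet? index 0 with
  | none => 0   -- Python raises IndexError here (index empty); excluded by Pre_
  | some idx => (goA preorder (((preorder.length : Int) - idx).toNat + 1) idx).1

-- ===== PORT B =====
-- the while-loop of Source B; state (idx, d, ans, stack).  On pyGet? = none the Python raises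
-- IndexError (excluded by Pre_); the port takes the leaf branch there.
def loopB (pre : List String) (idx d ans : Int) (stack : List Int) : Int :=
  if h : (pre.length : Int) ≤ idx ∨ (PySem.List.pyGet? pre idx).getD "l" = "l" then
    match stack with
    | [] => max ans d
    | d' :: rest => loopB pre (idx + 1) d' (max ans d) rest
  else
    loopB pre (idx + 1) (d + 1) ans ((d + 1) :: stack)
termination_by 2 * ((pre.length : Int) - idx).toNat + stack.length
decreasing_by
  · simp only [List.length_cons]; omega
  · simp only [List.length_cons]
    omega

def getDepthRecursive_alt (preorder : List String) (index : List Int) : Int :=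
  match PySem.List.pyGet? index 0 with
  | none => 0   -- Python raises IndexError here (index empty); excluded by Pre_
  | some idx => loopB preorder idx 0 0 []

-- ===== PRECONDITION & SPEC =====
-- Pre_ excludes exactly the inputs where the Python A raises IndexError: an empty index
-- list, or index[0] < -len(preorder) (every later access uses a strictly larger index).
def Pre_getDepthRecursive (preorder : List String) (index : List Int) : Prop :=
  index ≠ [] ∧ -(preorder.length : Int) ≤ index.headI

instance (preorder : List String) (index : List Int) : Decidable (Pre_getDepthRecursive preorder index) := by
  unfold Pre_getDepthRecursive; infer_instance

def pvWitness_getDepthRecursive : List String × List Int := (["n", "l", "n", "l", "l"], [0])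

def Spec_getDepthRecursive (preorder : List String) (index : List Int) (out : Int) : Prop := out = getDepthRecursive_alt preorder index
instance (preorder : List String) (index : List Int) (out : Int) : Decidable (Spec_getDepthRecursive preorder index out) := by unfold Spec_getDepthRecursive; infer_instance

-- ===== CLAIM (what is proved, stated in full; the proofs are below) =====
def Claim_equal_getDepthRecursive : Prop := ∀ (preorder : List String) (index : List Int), Dom_getDepthRecursive preorder index → Pre_getDepthRecursive preorder index → Spec_getDepthRecursive preorder index (getDepthRecursive preorder index)

-- ===== LEMMAS AND PROOFS =====

-- the final index returned by goA is ≥ the input index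
theorem goA_idx_le (pre : List String) (fuel : Nat) :
    ∀ idx : Int, idx ≤ (goA pre fuel idx).2 := by
  induction fuel with
  | zero => intro idx; simp [goA]
  | succ f ih =>
    intro idx
    simp only [goA]
    split
    · simp
    · cases h : PySem.List.pyGet? pre idx with
      | none => simp
      | some s =>
        simp only
        split
        · simp
        · simp only
          have h1 := ih (idx + 1)
          have h2 := ih ((goA pre f (idx + 1)).2 + 1)
          omega

-- heights are nonnegative
theorem goA_nonneg (pre : List String) (fuel : Nat) :
    ∀ idx : Int, 0 ≤ (goA pre fuel idx).1 := by
  induction fuel with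
  | zero => intro idx; simp [goA]
  | succ f ih =>
    intro idx
    simp only [goA]
    split
    · simp
    · cases h : PySem.List.pyGet? pre idx with
      | none => simp
      | some s =>
        simp only
        split
        · simp
        · have h1 := ih (idx + 1)
          have h2 := ih ((goA pre f (idx + 1)).2 + 1)
          simp only
          omega

-- Main correspondence: running B's loop from a state whose next task is "evaluate the
-- subtree at idx at depth d" is: evaluate it with A's recursion (any sufficient fuel),
-- fold its deepest-leaf depth d + h into ans, and continue with the popped stack.
theorem loopB_goA (pre : List String) (fuel : Nat) :
    ∀ (idx : Int), ((pre.length : Int) - idx).toNat < fuel →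
    ∀ (d ans : Int) (stack : List Int),
      loopB pre idx d ans stack =
        match stack with
        | [] => max ans (d + (goA pre fuel idx).1)
        | d' :: rest => loopB pre ((goA pre fuel idx).2 + 1) d' (max ans (d + (goA pre fuel idx).1)) rest := by
  induction fuel with
  | zero => intro idx h; omega
  | succ f ih =>
    intro idx hfuel d ans stack
    by_cases hleaf : (pre.length : Int) ≤ idx ∨ (PySem.List.pyGet? pre idx).getD "l" = "l"
    · -- leaf (or out-of-range, or IndexError position): goA returns (0, idx)
      have hA : goA pre (f + 1) idx = (0, idx) := by
        simp only [goA]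
        rcases hleaf with h | h
        · simp [h]
        · split
          · rfl
          · cases hg : PySem.List.pyGet? pre idx with
            | none => rfl
            | some s => simp [hg] at h; simp [h]
      rw [loopB.eq_def, dif_pos hleaf, hA]
      cases stack with
      | nil => simp
      | cons d' rest => simp
    · -- internal node
      rw [not_or] at hleaf
      obtain ⟨hlt, htok⟩ := hleaf
      obtain ⟨s, hg, hs⟩ : ∃ s, PySem.List.pyGet? pre idx = some s ∧ s ≠ "l" := by
        cases hg : PySem.List.pyGet? pre idx with
        | none => simp [hg] at htok
        | some s => exact ⟨s, rfl, by simpa [hg] using htok⟩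
      have hA : goA pre (f + 1) idx =
          (max (goA pre f (idx + 1)).1 (goA pre f ((goA pre f (idx + 1)).2 + 1)).1 + 1,
           (goA pre f ((goA pre f (idx + 1)).2 + 1)).2) := by
        simp only [goA, hg]
        rw [if_neg (by omega), if_neg hs]
      rw [loopB.eq_def, dif_neg (not_or.mpr ⟨by omega, by simp [hg, hs]⟩)]
      have hf1 : ((pre.length : Int) - (idx + 1)).toNat < f := by omega
      have hmono := goA_idx_le pre f (idx + 1)
      have hf2 : ((pre.length : Int) - ((goA pre f (idx + 1)).2 + 1)).toNat < f := by omega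
      rw [ih (idx + 1) hf1 (d + 1) ans ((d + 1) :: stack)]
      simp only
      rw [ih ((goA pre f (idx + 1)).2 + 1) hf2 (d + 1) (max ans (d + 1 + (goA pre f (idx + 1)).1)) stack]
      rw [hA]
      cases stack with
      | nil =>
        simp only
        omega
      | cons d' rest =>
        simp only
        congr 1
        omega

-- ===== VERDICT (by name: the statement is the Claim_ definition above) =====
theorem getDepthRecursive_spec : Claim_equal_getDepthRecursive := by
  intro preorder index _ _
  unfold Spec_getDepthRecursive getDepthRecursive getDepthRecursive_alt
  cases h : PySem.List.pyGet? index 0 with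
  | none => rfl
  | some idx =>
    simp only
    rw [loopB_goA preorder (((preorder.length : Int) - idx).toNat + 1) idx (by omega) 0 0 []]
    have := goA_nonneg preorder (((preorder.length : Int) - idx).toNat + 1) idx
    simp only
    omega
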